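-- pv_equiv track=rewrite | github.com/zhousujob/NERCP | numlib.py | num2str
-- ===== SOURCE A (Python) =====
-- def num2str(number,length):
--     #  'number' is the input number
--     # 'length' is the length of the output string
--     if len(str(number))>length:
--         raise Exception('variable "length" must be longer than "number"')
--     aStr=str(number)
--     for i in range(length):
--         if len(aStr)<length:
--             aStr='0'+aStr
--     return aStr;
-- ===== SOURCE B (Python) =====
-- def num2str(number,length):
--     if len(str(number))>length:
--         raise Exception('variable "length" must be longer than "number"')
--     aStr=str(number)
--     return '0'*(length-len(aStr))+aStr
-- ===== Notes on version B (the rewrite author's own statement) =====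
-- stated objective: faster
-- what changed: Replaces the range(length) loop that prepends '0' one character per iteration with a closed-form deficit computation: '0'*(length-len(aStr)) + aStr built in one step.
import Mathlib
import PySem

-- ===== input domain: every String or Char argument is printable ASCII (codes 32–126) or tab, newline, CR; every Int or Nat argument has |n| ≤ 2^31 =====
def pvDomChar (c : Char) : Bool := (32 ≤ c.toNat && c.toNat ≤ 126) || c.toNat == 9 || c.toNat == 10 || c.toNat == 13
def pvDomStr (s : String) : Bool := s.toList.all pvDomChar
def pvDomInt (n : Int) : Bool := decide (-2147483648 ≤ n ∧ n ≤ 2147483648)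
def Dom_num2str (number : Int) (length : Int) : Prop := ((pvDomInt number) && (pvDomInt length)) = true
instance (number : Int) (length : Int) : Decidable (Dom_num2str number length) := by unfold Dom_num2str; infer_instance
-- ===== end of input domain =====

-- B replaces A's per-character prepend loop with a single closed-form '0'-padding prefix; same result, same raising condition (excluded by Pre_).


-- ===== PORT A =====
-- for i in range(length): if len(aStr)<length: aStr = '0' + aStr   (strings as List Char, exact)
def num2str (number : Int) (length : Int) : String :=
  let aStr := PySem.Int.toChars number
  String.ofList ((PySem.List.pyRange 0 length 1).foldl
    (fun s _ => if (s.length : Int) < length then '0' :: s else s) aStr)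

-- ===== PORT B =====
-- return '0'*(length-len(aStr)) + aStr   (strings as List Char, exact; '0'*k is '' for k ≤ 0)
def num2str_alt (number : Int) (length : Int) : String :=
  let aStr := PySem.Int.toChars number
  String.ofList (List.replicate (length - aStr.length).toNat '0' ++ aStr)

-- ===== PRECONDITION & SPEC =====
-- A (and B) raise exactly when len(str(number)) > length; Pre_ excludes those inputs.
def Pre_num2str (number : Int) (length : Int) : Prop :=
  ((PySem.Int.toChars number).length : Int) ≤ length
instance (number : Int) (length : Int) : Decidable (Pre_num2str number length) := by
  unfold Pre_num2str; infer_instance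
def pvWitness_num2str : Int × Int := (5, 3)
def Spec_num2str (number : Int) (length : Int) (out : String) : Prop := out = num2str_alt number length
instance (number : Int) (length : Int) (out : String) : Decidable (Spec_num2str number length out) := by unfold Spec_num2str; infer_instance

-- ===== CLAIM (what is proved, stated in full; the proofs are below) =====
def Claim_equal_num2str : Prop := ∀ (number : Int) (length : Int), Dom_num2str number length → Pre_num2str number length → Spec_num2str number length (num2str number length)

-- ===== LEMMAS AND PROOFS =====
lemma pad_loop (l : List Int) (s : List Char) (L : Int)
    (h : (s.length : Int) ≤ L) (h2 : L ≤ (s.length : Int) + l.length) :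
    l.foldl (fun t _ => if (t.length : Int) < L then '0' :: t else t) s
      = List.replicate (L - s.length).toNat '0' ++ s := by
  induction l generalizing s with
  | nil =>
    simp only [List.foldl_nil, List.length_nil] at *
    have : (L - s.length).toNat = 0 := by omega
    simp [this]
  | cons a l ih =>
    simp only [List.foldl_cons, List.length_cons] at *
    by_cases hlt : (s.length : Int) < L
    · rw [if_pos hlt]
      rw [ih ('0' :: s) (by simp; omega) (by simp; omega)]
      have hn : (L - s.length).toNat = (L - ('0'::s).length).toNat + 1 := by
        simp; omega
      rw [hn, List.replicate_succ']
      simp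
    · rw [if_neg hlt]
      exact ih s h (by omega)

-- ===== VERDICT (by name: the statement is the Claim_ definition above) =====
theorem num2str_spec : Claim_equal_num2str := by
  intro number length _ hpre
  unfold Pre_num2str at hpre
  show num2str number length = num2str_alt number length
  unfold num2str num2str_alt
  simp only []
  have hlen : ((PySem.List.pyRange 0 length 1).length : Int)
      = length - 0 := by
    rw [PySem.List.length_pyRange_one]; omega
  rw [pad_loop _ _ _ hpre (by rw [hlen]; omega)]
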